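-- pv_equiv track=rewrite | github.com/LuisAugusto0205/C-digos-python | Python/obi simulado/fase1/2017/palimdromo.py | solve
-- ===== SOURCE A (Python) =====
-- def solve(n, palavra):
--     restante = [palavra]
--     sub_palavras = []
--     achou = False
--
--     while len(restante) > 0:
--         da_vez = restante[0]
--         for i in range(len(da_vez), 0, -1):
--             for j in range(0, i):
--                 sub = da_vez[j:i]
--                 if palindromo(sub):
--                     achou = True
--                     sub_palavras.append(sub)
--                     for x in da_vez.split(sub):
--                         if x:
--                             restante.append(x)
--                     del restante[0]
--                     break
--             if achou:
--                 achou = False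
--                 break
--     return len(sub_palavras)
--
-- def palindromo(palavra):
--     return palavra == palavra[::-1]
-- ===== SOURCE B (Python) =====
-- def solve(n, palavra):
--     # structural recursion + length-indexed palindrome DP (rolling rows) instead of
--     # A's worklist with a flagged nested substring scan
--     def lps_start(w):
--         # smallest j such that w[j:] is a palindrome, read off a DP over lengths:
--         # a substring of length L is a palindrome iff its ends match and the
--         # length-(L-2) substring between them is
--         m = len(w)
--         row2, row1 = [True] * (m + 1), [True] * m   # lengths 0 and 1
--         best = m - 1                                 # the single-character suffix
--         for L in range(2, m + 1):
--             row = [a == b and p for (a, b), p in zip(zip(w, w[L-1:]), row2[1:])]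
--             if row[m - L]:
--                 best = m - L
--             row2, row1 = row1, row
--         return best
--
--     def count(w):
--         s = w[lps_start(w):]
--         return 1 + sum(count(p) for p in w.split(s) if p)
--
--     return count(palavra) if palavra else 0
-- ===== Notes on version B (the rewrite author's own statement) =====
-- stated objective: alternative
-- what changed: A's FIFO worklist with a flagged, nested descending-i/ascending-j substring scan and a collected sub_palavras list is replaced by structural recursion on the split pieces plus a length-indexed palindrome dynamic program (rolling rows of a 'substring is palindrome' table) from which the longest palindromic suffix is read off; Pre_ excludes only the empty string, on which A's while loop never terminates.
-- outside the precondition, e.g. on solve(0, ''): A does not finish within the time limit, B returns 0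
import Mathlib
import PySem

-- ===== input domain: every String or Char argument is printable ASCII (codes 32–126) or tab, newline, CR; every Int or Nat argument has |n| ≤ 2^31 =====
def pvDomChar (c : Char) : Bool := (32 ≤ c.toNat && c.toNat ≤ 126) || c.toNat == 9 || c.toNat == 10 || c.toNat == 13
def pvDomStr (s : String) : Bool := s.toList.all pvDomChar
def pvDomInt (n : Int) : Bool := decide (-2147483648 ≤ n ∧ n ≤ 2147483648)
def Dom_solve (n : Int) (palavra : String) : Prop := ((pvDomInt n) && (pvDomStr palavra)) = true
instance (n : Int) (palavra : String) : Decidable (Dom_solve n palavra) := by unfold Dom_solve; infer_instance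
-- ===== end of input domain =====

-- B replaces A's FIFO worklist and flagged nested substring scan by structural recursion on the
-- split pieces plus a length-indexed palindrome DP (rolling rows) from which the longest
-- palindromic suffix is read off (objective: alternative algorithm, similar cost).

-- ===== PORT A =====
-- palindromo(palavra): palavra == palavra[::-1]; s[::-1] is reverse
def palindromo (palavra : List Char) : Bool := palavra == palavra.reverse

-- inner 'for j in range(0, i)' with its break: first palindromic da_vez[j:i]
def innerA (daVez : List Char) (i j : Nat) : Option (List Char) :=
  if _h : j < i then
    let sub := PySem.List.slice daVez (some (j : Int)) (some (i : Int))
    if palindromo sub then some sub else innerA daVez i (j + 1)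
  else none
  termination_by i - j

-- outer 'for i in range(len(da_vez), 0, -1)' with the achou break
def outerA (daVez : List Char) (i : Nat) : Option (List Char) :=
  match i with
  | 0 => none
  | k + 1 =>
    match innerA daVez (k + 1) 0 with
    | some sub => some sub
    | none => outerA daVez k

-- the while loop; fuel only makes it total (each Python iteration removes ≥ 1 character in
-- total, so len(palavra) iterations suffice); 'none' = Python spins forever (empty da_vez,
-- unreachable under Pre_)
def loopA (restante subPalavras : List (List Char)) (fuel : Nat) : Int :=
  match fuel with
  | 0 => (subPalavras.length : Int)
  | fuel + 1 =>
    match restante with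
    | [] => (subPalavras.length : Int)
    | daVez :: rest =>
      match outerA daVez daVez.length with
      | none => (subPalavras.length : Int)
      | some sub =>
        loopA (rest ++ (PySem.Chars.splitOn daVez sub).filter (fun x => !x.isEmpty))
          (subPalavras ++ [sub]) fuel

def solve (n : Int) (palavra : String) : Int :=
  loopA [palavra.toList] [] palavra.toList.length

-- ===== PORT B =====
-- lps_start(w): the DP loop 'for L in range(2, m+1)' over rolling rows (row2, row1, best);
-- row = [a == b and p for (a, b), p in zip(zip(w, w[L-1:]), row2[1:])]
def lpsStart (w : List Char) : Nat :=
  ((List.range' 2 (w.length - 1)).foldl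
    (fun (st : List Bool × List Bool × Nat) L =>
      let row := List.zipWith (fun ab p => (ab.1 == ab.2) && p) (w.zip (w.drop (L - 1))) st.1.tail
      let best := if row.getD (w.length - L) false then w.length - L else st.2.2
      (st.2.1, row, best))
    (List.replicate (w.length + 1) true, List.replicate w.length true, w.length - 1)).2.2

-- count(w): 1 + sum of count over the nonempty pieces of w.split(w[lps_start(w):]).
-- The fuel and the 'if w = []' branch only make the recursion total: each piece is strictly
-- shorter than w (proved below), so fuel = len(palavra) never runs out and '' is never reached.
def countB (fuel : Nat) (w : List Char) : Int :=
  match fuel with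
  | 0 => 0
  | fuel + 1 =>
    if w = [] then 0
    else
      1 + (((PySem.Chars.splitOn w
            (PySem.List.slice w (some ((lpsStart w : Nat) : Int)) none)).filter
            (fun p => !p.isEmpty)).map (countB fuel)).sum

def solve_alt (n : Int) (palavra : String) : Int :=
  if palavra.toList.isEmpty then 0 else countB palavra.toList.length palavra.toList

-- ===== PRECONDITION & SPEC =====
-- Pre_ excludes only the empty string, on which A's while loop never terminates (the inner
-- search finds nothing and restante is never shortened).
def Pre_solve (n : Int) (palavra : String) : Prop := palavra.toList ≠ []
instance (n : Int) (palavra : String) : Decidable (Pre_solve n palavra) := by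
  unfold Pre_solve; infer_instance

def pvWitness_solve : Int × String := (0, "ana")

def Spec_solve (n : Int) (palavra : String) (out : Int) : Prop := out = solve_alt n palavra
instance (n : Int) (palavra : String) (out : Int) : Decidable (Spec_solve n palavra out) := by
  unfold Spec_solve; infer_instance

-- ===== CLAIM (what is proved, stated in full; the proofs are below) =====
def Claim_equal_solve : Prop := ∀ (n : Int) (palavra : String), Dom_solve n palavra →
  Pre_solve n palavra → Spec_solve n palavra (solve n palavra)

-- ===== LEMMAS AND PROOFS =====

-- every nonempty piece of w.split(s) is shorter than w when s is a nonempty infix of w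
-- (stated on the reference split refSplit = PySem.Chars.splitOn)
def refSplit (sep : List Char) : List Char → List Char → List (List Char)
  | pre, [] => [pre]
  | pre, c :: rest =>
    if sep.isPrefixOf (c :: rest) then pre :: refSplit sep [] (rest.drop (sep.length - 1))
    else refSplit sep (pre ++ [c]) rest
  termination_by _ l => l.length
  decreasing_by
    all_goals simp

theorem splitOn_go_eq (sep : List Char) (hsep : sep ≠ []) : ∀ (fuel : Nat)
    (l cur : List Char) (acc : List (List Char)), l.length ≤ fuel →
    PySem.Chars.splitOn.go sep fuel l cur acc = acc.reverse ++ refSplit sep cur.reverse l := by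
  intro fuel
  induction fuel with
  | zero =>
    intro l cur acc hl
    have : l = [] := List.eq_nil_of_length_eq_zero (by omega)
    subst this
    simp [PySem.Chars.splitOn.go, refSplit]
  | succ fuel ih =>
    intro l cur acc hl
    cases l with
    | nil => simp [PySem.Chars.splitOn.go, refSplit]
    | cons c rest =>
      rw [PySem.Chars.splitOn.go]
      by_cases hp : sep.isPrefixOf (c :: rest) = true
      · rw [if_pos hp]
        have hsl : 1 ≤ sep.length := List.length_pos_of_ne_nil hsep
        have hdrop : (c :: rest).drop sep.length = rest.drop (sep.length - 1) := by
          cases hs : sep.length with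
          | zero => omega
          | succ k => simp
        rw [hdrop]
        rw [ih _ _ _ (by have := hl; simp at this ⊢; omega)]
        simp [refSplit, hp]
      · rw [if_neg hp]
        rw [ih _ _ _ (by simp at hl ⊢; omega)]
        simp [refSplit, hp]

theorem splitOn_eq (w sep : List Char) (hsep : sep ≠ []) :
    PySem.Chars.splitOn w sep = refSplit sep [] w := by
  rw [PySem.Chars.splitOn, splitOn_go_eq sep hsep _ _ _ _ (by omega)]
  simp

theorem refSplit_ne_nil (sep pre l : List Char) : refSplit sep pre l ≠ [] := by
  induction pre, l using refSplit.induct sep with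
  | case1 pre => simp [refSplit]
  | case2 pre c rest hp ih => simp [refSplit, hp]
  | case3 pre c rest hp ih => simpa [refSplit, hp] using ih

theorem refSplit_sum (sep : List Char) (hsep : sep ≠ []) (pre l : List Char) :
    ((refSplit sep pre l).map List.length).sum
      + sep.length * ((refSplit sep pre l).length - 1) = pre.length + l.length := by
  induction pre, l using refSplit.induct sep with
  | case1 pre => simp [refSplit]
  | case2 pre c rest hp ih =>
    have hne := refSplit_ne_nil sep [] (rest.drop (sep.length - 1))
    obtain ⟨m, hm⟩ : ∃ m, (refSplit sep [] (rest.drop (sep.length - 1))).length = m + 1 :=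
      ⟨(refSplit sep [] (rest.drop (sep.length - 1))).length - 1,
        by have := List.length_pos_of_ne_nil hne; omega⟩
    have hple : sep.length ≤ (c :: rest).length := (List.isPrefixOf_iff_prefix.mp hp).length_le
    have hsl : 1 ≤ sep.length := List.length_pos_of_ne_nil hsep
    have hdl : (rest.drop (sep.length - 1)).length = rest.length - (sep.length - 1) := by simp
    rw [hm, hdl] at ih
    simp only [List.length_nil, Nat.zero_add, Nat.add_sub_cancel] at ih
    simp only [List.length_cons] at hple
    simp only [refSplit, if_pos hp, List.map_cons, List.sum_cons, List.length_cons, hm,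
      Nat.add_sub_cancel, Nat.mul_succ]
    omega
  | case3 pre c rest hp ih =>
    simp only [refSplit, if_neg hp]
    simp only [List.length_append, List.length_singleton] at ih
    simp only [List.length_cons]
    omega

theorem refSplit_two_le (sep : List Char) (hsep : sep ≠ []) (pre l : List Char)
    (h : sep <:+: l) : 2 ≤ (refSplit sep pre l).length := by
  induction pre, l using refSplit.induct sep with
  | case1 pre =>
    rw [List.infix_nil] at h
    exact absurd h hsep
  | case2 pre c rest hp ih =>
    have : 1 ≤ (refSplit sep [] (rest.drop (sep.length - 1))).length :=
      List.length_pos_of_ne_nil (refSplit_ne_nil sep _ _)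
    simp only [refSplit, if_pos hp, List.length_cons]
    omega
  | case3 pre c rest hp ih =>
    have hr : sep <:+: rest := by
      rcases List.infix_cons_iff.mp h with h1 | h1
      · exact absurd (List.isPrefixOf_iff_prefix.mpr h1) (by simpa using hp)
      · exact h1
    simpa [refSplit, hp] using ih hr

theorem split_sum_lt (w sep : List Char) (hsep : sep ≠ []) (hin : sep <:+: w) :
    ((((PySem.Chars.splitOn w sep).filter (fun p => !p.isEmpty)).map List.length).sum)
      < w.length := by
  rw [splitOn_eq w sep hsep]
  have hsum := refSplit_sum sep hsep [] w
  have h2 := refSplit_two_le sep hsep [] w hin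
  have hsl : 1 ≤ sep.length := List.length_pos_of_ne_nil hsep
  have hfil : (((refSplit sep [] w).filter (fun p => !p.isEmpty)).map List.length).sum
      ≤ ((refSplit sep [] w).map List.length).sum := by
    exact List.Sublist.sum_le_sum (List.filter_sublist.map List.length) (fun a _ => Nat.zero_le a)
  have hmul : sep.length ≤ sep.length * ((refSplit sep [] w).length - 1) :=
    Nat.le_mul_of_pos_right _ (by omega)
  simp only [List.length_nil, Nat.zero_add] at hsum
  omega

theorem mem_split_lt (w sep p : List Char) (hsep : sep ≠ []) (hin : sep <:+: w)
    (hp : p ∈ (PySem.Chars.splitOn w sep).filter (fun q => !q.isEmpty)) :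
    p.length < w.length := by
  have h1 : p.length ≤ ((((PySem.Chars.splitOn w sep).filter (fun q => !q.isEmpty)).map
      List.length).sum) :=
    List.single_le_sum (fun x _ => Nat.zero_le x) _ (List.mem_map_of_mem hp)
  exact lt_of_le_of_lt h1 (split_sum_lt w sep hsep hin)


-- the longest palindromic suffix, the value both programs compute per piece
def lps : List Char → List Char
  | [] => []
  | c :: rest => if palindromo (c :: rest) then c :: rest else lps rest

-- its start index: lps w = w.drop (lpsIdx w)
def lpsIdx : List Char → Nat
  | [] => 0
  | c :: rest => if palindromo (c :: rest) then 0 else lpsIdx rest + 1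

theorem pal_singleton (c : Char) : palindromo [c] = true := by simp [palindromo]

theorem lps_suffix (w : List Char) : lps w <:+ w := by
  induction w with
  | nil => simp [lps]
  | cons c rest ih =>
    simp only [lps]
    split
    · exact List.suffix_refl _
    · exact ih.trans (List.suffix_cons c rest)

theorem lps_ne_nil (w : List Char) (hw : w ≠ []) : lps w ≠ [] := by
  induction w with
  | nil => exact absurd rfl hw
  | cons c rest ih =>
    simp only [lps]
    split
    · simp
    · rename_i hpal
      have hrest : rest ≠ [] := by
        rintro rfl
        exact hpal (pal_singleton c)
      exact ih hrest

theorem lps_eq_drop (w : List Char) : lps w = w.drop (lpsIdx w) := by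
  induction w with
  | nil => simp [lps, lpsIdx]
  | cons c rest ih =>
    simp only [lps, lpsIdx]
    split
    · simp
    · simpa using ih

theorem slice_full (w : List Char) (j : Nat) :
    PySem.List.slice w (some (j : Int)) (some ((w.length : Int))) = w.drop j := by
  rw [show ((w.length : Int)) = ((w.length : Nat) : Int) from rfl, PySem.List.slice_natCast]
  have : (w.drop j).length = w.length - j := by simp
  rw [← this, List.take_length]

-- innerA at i = len(da_vez) finds the longest palindromic suffix of the part after j
theorem innerA_eq (w : List Char) (j : Nat) (hj : j < w.length) :
    innerA w w.length j = some (lps (w.drop j)) := by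
  have hdrop := List.drop_eq_getElem_cons hj
  rw [innerA]
  rw [dif_pos hj]
  simp only [slice_full]
  by_cases hp : palindromo (w.drop j) = true
  · rw [if_pos hp]
    rw [hdrop]
    simp [lps, ← hdrop, hp]
  · rw [if_neg hp]
    have hj1 : j + 1 < w.length := by
      rcases Nat.lt_or_ge (j+1) w.length with h | h
      · exact h
      · exfalso
        have : w.drop (j+1) = [] := List.drop_eq_nil_of_le h
        rw [this] at hdrop
        rw [hdrop] at hp
        exact hp (pal_singleton _)
    rw [innerA_eq w (j+1) hj1]
    rw [hdrop]
    simp only [lps]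
    rw [if_neg (by rw [← hdrop]; exact hp)]
  termination_by w.length - j

theorem outerA_eq (w : List Char) (hw : w ≠ []) : outerA w w.length = some (lps w) := by
  have h0 : 0 < w.length := List.length_pos_of_ne_nil hw
  have h := innerA_eq w 0 h0
  rw [List.drop_zero] at h
  cases hlen : w.length with
  | zero => omega
  | succ k =>
    rw [hlen] at h
    simp [outerA, h]

-- ends-match recurrence the DP rows implement
theorem pal_append (c d : Char) (l : List Char) :
    palindromo (c :: (l ++ [d])) = ((c == d) && palindromo l) := by
  simp only [palindromo, ← List.cons_append, List.reverse_append, List.reverse_cons]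
  by_cases hcd : c = d
  · subst hcd
    simp
  · have h : (c == d) = false := beq_eq_false_iff_ne.mpr hcd
    simp [h]

theorem pal_take (w : List Char) (j L : Nat) (h2 : 2 ≤ L) (hjL : j + L ≤ w.length) :
    palindromo ((w.drop j).take L)
      = ((w.getD j ' ' == w.getD (j + L - 1) ' ') && palindromo ((w.drop (j + 1)).take (L - 2))) := by
  have hj : j < w.length := by omega
  have hj2 : j + L - 1 < w.length := by omega
  have h1 : List.drop j w = w[j] :: List.drop (j+1) w := List.drop_eq_getElem_cons hj
  have hL : L = (L - 2) + 1 + 1 := by omega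
  rw [h1, hL, List.take_succ_cons, List.take_add_one]
  have hget : (List.drop (j+1) w)[L-2]? = some w[j + L - 1] := by
    have hidx : j + 1 + (L - 2) = j + L - 1 := by omega
    rw [List.getElem?_drop, hidx, List.getElem?_eq_getElem hj2]
  rw [hget]
  simp only [Option.toList_some]
  rw [pal_append]
  have e2 : L - 2 + 1 + 1 - 2 = L - 2 := by omega
  rw [e2]
  congr 1
  have e3 : j + (L - 2 + 1 + 1) - 1 = j + L - 1 := by omega
  rw [e3, List.getD_eq_getElem w ' ' hj, List.getD_eq_getElem w ' ' hj2]

-- proof-side meaning of a DP row: palindromity of all length-k substrings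
def rowOf (w : List Char) (k : Nat) : List Bool :=
  (List.range (w.length - k + 1)).map (fun j => palindromo ((w.drop j).take k))

theorem rowOf_zero (w : List Char) : rowOf w 0 = List.replicate (w.length + 1) true := by
  simp [rowOf, palindromo]

theorem rowOf_one (w : List Char) (hw : w ≠ []) : rowOf w 1 = List.replicate w.length true := by
  have hm : 0 < w.length := List.length_pos_of_ne_nil hw
  apply List.eq_replicate_iff.mpr
  constructor
  · simp [rowOf]
    omega
  · intro b hb
    simp only [rowOf] at hb
    obtain ⟨j, hj, hbe⟩ := List.mem_map.mp hb
    have hjm : j < w.length := by have := List.mem_range.mp hj; omega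
    have h1 : List.drop j w = w[j] :: List.drop (j+1) w := List.drop_eq_getElem_cons hjm
    have h2 : List.take 1 (List.drop j w) = [w[j]] := by rw [h1]; rfl
    rw [h2, pal_singleton] at hbe
    exact hbe.symm

theorem row_step (w : List Char) (L : Nat) (h2 : 2 ≤ L) (hL : L ≤ w.length) :
    List.zipWith (fun ab p => ((ab.1 : Char) == ab.2) && p) (w.zip (w.drop (L - 1)))
      (rowOf w (L - 2)).tail = rowOf w L := by
  apply List.ext_getElem
  · simp [rowOf]
    omega
  · intro j hj1 hj2
    simp only [rowOf, List.getElem_zipWith, List.getElem_zip, List.getElem_tail,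
      List.getElem_map, List.getElem_range, List.getElem_drop]
    have hjlen : j < w.length - L + 1 := by simpa [rowOf] using hj2
    rw [pal_take w j L h2 (by omega)]
    rw [List.getD_eq_getElem w ' ' (by omega : j < w.length),
        List.getD_eq_getElem w ' ' (by omega : j + L - 1 < w.length)]
    have e1 : w[L - 1 + j]'(by omega) = w[j + L - 1]'(by omega) :=
      getElem_congr_idx (by omega)
    rw [e1]

theorem fold_inv (w : List Char) (hw : w ≠ []) : ∀ (k : Nat), k ≤ w.length - 1 →
    ((List.range' 2 k).foldl
      (fun (st : List Bool × List Bool × Nat) L =>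
        let row := List.zipWith (fun ab p => (ab.1 == ab.2) && p) (w.zip (w.drop (L - 1))) st.1.tail
        let best := if row.getD (w.length - L) false then w.length - L else st.2.2
        (st.2.1, row, best))
      (List.replicate (w.length + 1) true, List.replicate w.length true, w.length - 1))
    = (rowOf w k, rowOf w (k + 1),
        (w.length - (k + 1)) + lpsIdx (w.drop (w.length - (k + 1)))) := by
  have hm : 0 < w.length := List.length_pos_of_ne_nil hw
  intro k
  induction k with
  | zero =>
    intro _
    simp only [List.range'_zero, List.foldl_nil]
    rw [rowOf_zero, rowOf_one w hw]
    have h1 : w.length - (0 + 1) = w.length - 1 := rfl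
    obtain ⟨c, hc⟩ : ∃ c, w.drop (w.length - 1) = [c] := by
      have hl : (w.drop (w.length - 1)).length = 1 := by simp; omega
      cases hd : w.drop (w.length - 1) with
      | nil => rw [hd] at hl; simp at hl
      | cons c rest =>
        rw [hd] at hl
        simp at hl
        exact ⟨c, by rw [hl]⟩
    rw [h1, hc]
    simp [lpsIdx, pal_singleton]
  | succ k ih =>
    intro hk
    rw [List.range'_concat, List.foldl_append, ih (by omega)]
    simp only [List.foldl_cons, List.foldl_nil, Nat.one_mul]
    have hrow := row_step w (k + 2) (by omega) (by omega)
    rw [show k + 2 - 1 = 2 + k - 1 from by omega, show k + 2 - 2 = k from by omega] at hrow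
    have hidx : w.length - (2 + k) < (rowOf w (k + 2)).length := by
      simp [rowOf]
      omega
    have hdrop : List.drop (w.length - (2 + k)) w
        = w[w.length - (2 + k)]'(by omega) :: List.drop (w.length - (k + 1)) w := by
      have := List.drop_eq_getElem_cons (l := w) (i := w.length - (2 + k)) (by omega)
      rw [this]
      congr 2
      omega
    have hcond : (rowOf w (k + 2)).getD (w.length - (2 + k)) false
        = palindromo (List.drop (w.length - (2 + k)) w) := by
      rw [List.getD_eq_getElem _ false hidx]
      simp only [rowOf, List.getElem_map, List.getElem_range]
      congr 1
      apply List.take_of_length_le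
      simp
      omega
    refine Prod.ext rfl (Prod.ext ?_ ?_)
    · dsimp only
      rw [hrow]
    · dsimp only
      rw [show k + 1 + 1 = 2 + k from by omega, hrow, hcond, hdrop]
      simp only [lpsIdx]
      split
      · omega
      · omega

theorem lpsStart_eq (w : List Char) (hw : w ≠ []) : lpsStart w = lpsIdx w := by
  have hm : 0 < w.length := List.length_pos_of_ne_nil hw
  unfold lpsStart
  rw [fold_inv w hw (w.length - 1) (by omega)]
  have : w.length - (w.length - 1 + 1) = 0 := by omega
  simp [this]

theorem countB_nil (f : Nat) : countB f [] = 0 := by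
  cases f <;> simp [countB]

theorem slice_lps (w : List Char) (hw : w ≠ []) :
    PySem.List.slice w (some ((lpsStart w : Nat) : Int)) none = lps w := by
  rw [PySem.List.slice_from_natCast, lpsStart_eq w hw, ← lps_eq_drop]

theorem countB_congr : ∀ (f1 : Nat) (w : List Char) (f2 : Nat), w.length ≤ f1 →
    w.length ≤ f2 → countB f1 w = countB f2 w := by
  intro f1
  induction f1 with
  | zero =>
    intro w f2 h1 _
    have : w = [] := List.eq_nil_of_length_eq_zero (by omega)
    subst this
    rw [countB_nil, countB_nil]
  | succ f1 ih =>
    intro w f2 h1 h2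
    by_cases hw : w = []
    · subst hw
      rw [countB_nil, countB_nil]
    · have hm : 0 < w.length := List.length_pos_of_ne_nil hw
      cases f2 with
      | zero => omega
      | succ f2 =>
        simp only [countB, if_neg hw]
        congr 1
        congr 1
        apply List.map_congr_left
        intro p hp
        have hplt : p.length < w.length := by
          refine mem_split_lt w _ p ?_ ?_ hp
          · rw [slice_lps w hw]
            exact lps_ne_nil w hw
          · rw [slice_lps w hw]
            exact (lps_suffix w).isInfix
        exact ih p f2 (by omega) (by omega)

theorem countB_eq (w : List Char) (hw : w ≠ []) :
    countB w.length w = 1 + (((PySem.Chars.splitOn w (lps w)).filter (fun p => !p.isEmpty)).map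
      (fun p => countB p.length p)).sum := by
  have hm : 0 < w.length := List.length_pos_of_ne_nil hw
  obtain ⟨l, hl⟩ : ∃ l, w.length = l + 1 := ⟨w.length - 1, by omega⟩
  rw [hl]
  simp only [countB, if_neg hw]
  rw [slice_lps w hw]
  congr 1
  congr 1
  apply List.map_congr_left
  intro p hp
  have hplt : p.length < w.length :=
    mem_split_lt w _ p (lps_ne_nil w hw) (lps_suffix w).isInfix hp
  exact countB_congr l p p.length (by omega) (by omega)

theorem loopA_eq : ∀ (fuel : Nat) (queue acc : List (List Char)),
    (∀ p ∈ queue, p ≠ []) → (queue.map List.length).sum ≤ fuel →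
    loopA queue acc fuel
      = (acc.length : Int) + (queue.map (fun w => countB w.length w)).sum := by
  intro fuel
  induction fuel with
  | zero =>
    intro queue acc hne hsum
    cases queue with
    | nil => simp [loopA]
    | cons w rest =>
      exfalso
      have h1 : 1 ≤ w.length := List.length_pos_of_ne_nil (hne w List.mem_cons_self)
      simp only [List.map_cons, List.sum_cons, Nat.le_zero] at hsum
      omega
  | succ fuel ih =>
    intro queue acc hne hsum
    cases queue with
    | nil => simp [loopA]
    | cons w rest =>
      have hw : w ≠ [] := hne w List.mem_cons_self
      have hlps_ne := lps_ne_nil w hw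
      have hinf : lps w <:+: w := (lps_suffix w).isInfix
      have hparts := split_sum_lt w (lps w) hlps_ne hinf
      simp only [loopA, outerA_eq w hw]
      rw [ih _ _ ?_ ?_]
      · simp only [List.map_append, List.sum_append, List.map_cons, List.sum_cons,
          List.length_append, List.length_cons, List.length_nil]
        rw [countB_eq w hw]
        push_cast
        ring
      · intro p hp
        rcases List.mem_append.mp hp with h | h
        · exact hne p (List.mem_cons_of_mem _ h)
        · have := List.of_mem_filter h
          simpa using this
      · simp only [List.map_append, List.sum_append]
        simp only [List.map_cons, List.sum_cons] at hsum
        omega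

-- ===== VERDICT (by name: the statement is the Claim_ definition above) =====
theorem solve_spec : Claim_equal_solve := by
  intro n palavra _hDom hPre
  unfold Spec_solve solve solve_alt
  have hne : palavra.toList ≠ [] := hPre
  rw [loopA_eq _ _ _ (by simpa using hne) (by simp)]
  rw [if_neg (by simpa using hne)]
  simp
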